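-- pv_equiv track=rewrite | github.com/nickgoberville/namv-mi-cost-analysis | src/modules/namv_mi/cost_model.py | get_dep_vect
-- ===== SOURCE A (Python) =====
-- def get_dep_vect(x, y, z, time=15):
--     out_vector = []
--
--     for t in range(time):
--         if t<x:
--             out_vector.append(0)
--         elif t>=x and t<y:
--             out_vector.append(1)
--         elif t>=y and t<z:
--             out_vector.append(2)
--         elif t>=z:
--             out_vector.append(3)
--
--     return out_vector
-- ===== SOURCE B (Python) =====
-- def get_dep_vect(x, y, z, time=15):
--     out = []
--     for t in range(time):
--         level = 0
--         for th in (x, y, z):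
--             if t < th:
--                 break
--             level += 1
--         out.append(level)
--     return out
-- ===== Notes on version B (the rewrite author's own statement) =====
-- stated objective: simpler
-- what changed: Replaces the hardcoded four-branch if/elif cascade with an inner scan of the threshold tuple (x, y, z) that counts passed thresholds and breaks at the first failure, generalizing the three fixed branches.
import Mathlib
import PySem

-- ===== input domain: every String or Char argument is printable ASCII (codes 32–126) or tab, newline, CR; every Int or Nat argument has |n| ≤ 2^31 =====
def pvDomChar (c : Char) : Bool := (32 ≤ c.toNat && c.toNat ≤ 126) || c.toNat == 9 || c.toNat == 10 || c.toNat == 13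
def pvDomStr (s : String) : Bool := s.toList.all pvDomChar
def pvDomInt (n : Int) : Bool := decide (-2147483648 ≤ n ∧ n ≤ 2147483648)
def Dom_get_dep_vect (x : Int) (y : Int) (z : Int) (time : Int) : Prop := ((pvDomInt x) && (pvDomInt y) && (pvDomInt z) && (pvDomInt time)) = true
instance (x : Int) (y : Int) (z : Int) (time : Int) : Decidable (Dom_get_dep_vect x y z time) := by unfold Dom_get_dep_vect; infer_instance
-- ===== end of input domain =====

-- B replaces A's fixed four-branch if/elif cascade with an inner break-on-first-failure
-- scan over the threshold tuple (x, y, z); objective: simpler/more general decomposition.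

-- ===== PORT A =====
def get_dep_vect (x : Int) (y : Int) (z : Int) (time : Int) : List Int :=
  (PySem.List.pyRange 0 time 1).foldl (fun out_vector t =>
    if t < x then out_vector ++ [0]
    else if x ≤ t ∧ t < y then out_vector ++ [1]
    else if y ≤ t ∧ t < z then out_vector ++ [2]
    else if z ≤ t then out_vector ++ [3]
    else out_vector) []

-- ===== PORT B =====
-- inner 'for th in (x, y, z): if t < th: break; level += 1'
def pvLevel (t : Int) : List Int → Int
  | [] => 0
  | th :: rest => if t < th then 0 else 1 + pvLevel t rest

def get_dep_vect_alt (x : Int) (y : Int) (z : Int) (time : Int) : List Int :=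
  (PySem.List.pyRange 0 time 1).foldl (fun out t => out ++ [pvLevel t [x, y, z]]) []

-- ===== PRECONDITION & SPEC =====
def Spec_get_dep_vect (x : Int) (y : Int) (z : Int) (time : Int) (out : List Int) : Prop := out = get_dep_vect_alt x y z time
instance (x : Int) (y : Int) (z : Int) (time : Int) (out : List Int) : Decidable (Spec_get_dep_vect x y z time out) := by unfold Spec_get_dep_vect; infer_instance

-- ===== CLAIM (what is proved, stated in full; the proofs are below) =====
def Claim_equal_get_dep_vect : Prop := ∀ (x : Int) (y : Int) (z : Int) (time : Int), Dom_get_dep_vect x y z time → Spec_get_dep_vect x y z time (get_dep_vect x y z time)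

-- ===== LEMMAS AND PROOFS =====

-- A's cascade appends exactly the break-counted level for each t.
theorem pvStep_eq (x y z t : Int) (acc : List Int) :
    (if t < x then acc ++ [0]
     else if x ≤ t ∧ t < y then acc ++ [1]
     else if y ≤ t ∧ t < z then acc ++ [2]
     else if z ≤ t then acc ++ [3]
     else acc) = acc ++ [pvLevel t [x, y, z]] := by
  simp only [pvLevel]
  split_ifs <;> simp_all

theorem pvFoldl_eq (x y z : Int) (l : List Int) (acc : List Int) :
    l.foldl (fun out_vector t =>
      if t < x then out_vector ++ [0]
      else if x ≤ t ∧ t < y then out_vector ++ [1]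
      else if y ≤ t ∧ t < z then out_vector ++ [2]
      else if z ≤ t then out_vector ++ [3]
      else out_vector) acc
    = l.foldl (fun out t => out ++ [pvLevel t [x, y, z]]) acc := by
  induction l generalizing acc with
  | nil => rfl
  | cons t rest ih =>
    rw [List.foldl_cons, List.foldl_cons, pvStep_eq]
    exact ih _

-- ===== VERDICT (by name: the statement is the Claim_ definition above) =====
theorem get_dep_vect_spec : Claim_equal_get_dep_vect := by
  intro x y z time _
  unfold Spec_get_dep_vect get_dep_vect get_dep_vect_alt
  exact pvFoldl_eq x y z _ []
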